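-- pv_equiv track=rewrite | github.com/pennyenterline/Infographic | infographic.py | count_capital
-- ===== SOURCE A (Python) =====
-- def count_capital(dictionary):
--     '''
--     counts the amount of capital and non capital letters
--     in the dictionary of words
--     returns the amount of captial/noncapital
--     '''
--     capital = 0
--     non_capital = 0
--     # Loops through each word in words_dict
--     for key in dictionary:
--         if key[0] < 'a':
--             capital += 1
--         else:
--             non_capital += 1
--     return capital, non_capital
-- ===== SOURCE B (Python) =====
-- def count_capital(dictionary):
--     def rec(keys):
--         if not keys:
--             return (0, 0)
--         if len(keys) == 1:
--             return (1, 0) if keys[0][0] < 'a' else (0, 1)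
--         mid = len(keys) // 2
--         c1, n1 = rec(keys[:mid])
--         c2, n2 = rec(keys[mid:])
--         return (c1 + c2, n1 + n2)
--     return rec(list(dictionary))
-- ===== Notes on version B (the rewrite author's own statement) =====
-- stated objective: alternative
-- what changed: B counts by divide-and-conquer: it splits the key list into halves, counts each half recursively, and combines the (capital, non_capital) pairs by component-wise addition, instead of A's single left-to-right loop incrementing two counters.
import Mathlib
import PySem

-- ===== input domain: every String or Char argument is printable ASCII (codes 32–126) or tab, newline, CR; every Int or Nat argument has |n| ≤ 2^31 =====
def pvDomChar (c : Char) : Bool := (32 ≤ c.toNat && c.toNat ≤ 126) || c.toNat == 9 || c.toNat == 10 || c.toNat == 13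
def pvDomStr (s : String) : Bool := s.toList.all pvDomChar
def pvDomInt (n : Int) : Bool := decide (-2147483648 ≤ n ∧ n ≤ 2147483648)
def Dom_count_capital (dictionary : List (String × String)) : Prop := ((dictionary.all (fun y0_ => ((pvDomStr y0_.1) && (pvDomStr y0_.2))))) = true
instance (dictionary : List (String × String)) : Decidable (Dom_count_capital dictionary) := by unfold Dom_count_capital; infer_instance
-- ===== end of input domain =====

-- B replaces A's single left-to-right two-counter loop by divide-and-conquer on the key list (alternative decomposition, same cost).

-- ===== PORT A =====
-- A: loops over keys keeping two counters, branching on key[0] < 'a'.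
-- key[0] raises IndexError on an empty key (excluded by Pre_ below; .getD 'a' is never hit inside Pre_).
def count_capital (dictionary : List (String × String)) : Int × Int :=
  dictionary.foldl
    (fun (st : Int × Int) kv =>
      if (PySem.Str.pyGet? kv.1 0).getD 'a' < 'a' then (st.1 + 1, st.2)
      else (st.1, st.2 + 1))
    (0, 0)

-- ===== PORT B =====
-- B's helper rec: divide-and-conquer over the list of keys; keys[:mid]/keys[mid:] = take/drop.
def ccRec (keys : List String) : Int × Int :=
  match keys with
  | [] => (0, 0)
  | [k] => if (PySem.Str.pyGet? k 0).getD 'a' < 'a' then (1, 0) else (0, 1)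
  | k1 :: k2 :: rest =>
    let keys' := k1 :: k2 :: rest
    let mid := keys'.length / 2
    let p1 := ccRec (keys'.take mid)
    let p2 := ccRec (keys'.drop mid)
    (p1.1 + p2.1, p1.2 + p2.2)
termination_by keys.length
decreasing_by
  · simp [List.length_take]; omega
  · simp [List.length_drop]; omega

def count_capital_alt (dictionary : List (String × String)) : Int × Int :=
  ccRec (dictionary.map Prod.fst)

-- ===== PRECONDITION & SPEC =====
-- Pre_ excludes dictionaries with an empty-string key, on which A's key[0] raises IndexError (B raises there too).
def Pre_count_capital (dictionary : List (String × String)) : Prop :=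
  ∀ kv ∈ dictionary, kv.1 ≠ ""
instance (dictionary : List (String × String)) : Decidable (Pre_count_capital dictionary) := by
  unfold Pre_count_capital; infer_instance
def pvWitness_count_capital : (List (String × String)) := [("Ab", "x"), ("cd", "y")]

def Spec_count_capital (dictionary : List (String × String)) (out : Int × Int) : Prop := out = count_capital_alt dictionary
instance (dictionary : List (String × String)) (out : Int × Int) : Decidable (Spec_count_capital dictionary out) := by unfold Spec_count_capital; infer_instance

-- ===== CLAIM (what is proved, stated in full; the proofs are below) =====
def Claim_equal_count_capital : Prop := ∀ (dictionary : List (String × String)), Dom_count_capital dictionary → Pre_count_capital dictionary → Spec_count_capital dictionary (count_capital dictionary)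

-- ===== LEMMAS AND PROOFS =====

def ccP (k : String) : Bool := decide ((PySem.Str.pyGet? k 0).getD 'a' < 'a')

-- B's recursion computes (count of capital-initial keys, count of the rest).
lemma filterlen_split (p : String → Bool) (n : ℕ) (l : List String) :
    (l.filter p).length = ((l.take n).filter p).length + ((l.drop n).filter p).length := by
  conv_lhs => rw [← List.take_append_drop n l]
  rw [List.filter_append, List.length_append]

lemma ccRec_eq (keys : List String) :
    ccRec keys = (((keys.filter ccP).length : Int), ((keys.filter (fun k => !ccP k)).length : Int)) := by
  fun_induction ccRec keys with
  | case1 => simp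
  | case2 k h =>
    have hc : ccP k = true := by unfold ccP; exact decide_eq_true h
    simp [List.filter, hc]
  | case3 k h =>
    have hc : ccP k = false := by unfold ccP; exact decide_eq_false h
    simp [List.filter, hc]
  | case4 k1 k2 rest keys' mid p1 p2 ih1 ih2 =>
    refine Prod.ext ?_ ?_ <;>
      (simp only [p1, p2, ih1, ih2]
       rw [show (k1 :: k2 :: rest) = keys' from rfl]
       rw [filterlen_split _ mid keys', Nat.cast_add])

-- A's fold accumulates the same two counts.
lemma cc_fold (d : List (String × String)) (a b : Int) :
    d.foldl
      (fun (st : Int × Int) kv =>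
        if (PySem.Str.pyGet? kv.1 0).getD 'a' < 'a' then (st.1 + 1, st.2)
        else (st.1, st.2 + 1))
      (a, b)
    = (a + (((d.map Prod.fst).filter ccP).length : Int),
       b + (((d.map Prod.fst).filter (fun k => !ccP k)).length : Int)) := by
  induction d generalizing a b with
  | nil => simp
  | cons kv t ih =>
    simp only [List.foldl_cons, List.map_cons, List.filter_cons]
    by_cases h : (PySem.Str.pyGet? kv.1 0).getD 'a' < 'a'
    · have hc : ccP kv.1 = true := by unfold ccP; exact decide_eq_true h
      rw [if_pos h, ih]
      simp [hc, Prod.ext_iff]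
      ring
    · have hc : ccP kv.1 = false := by unfold ccP; exact decide_eq_false h
      rw [if_neg h, ih]
      simp [hc, Prod.ext_iff]
      ring

-- ===== VERDICT (by name: the statement is the Claim_ definition above) =====
theorem count_capital_spec : Claim_equal_count_capital := by
  intro d _ _
  unfold Spec_count_capital count_capital count_capital_alt
  rw [cc_fold, ccRec_eq]
  simp
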